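-- pv_equiv track=rewrite | github.com/DianaBankWeinberg60/https-github.com-UT-DSA-Web-F25-friends-DianaBankWeinberg60 | myfriends.py | make_team_roster
-- ===== SOURCE A (Python) =====
-- from typing import List, Tuple, Dict, Set, Iterator
--
-- def make_team_roster(person: str, my_dir: Dict[str, Set[str]]) -> str:
--     assert person in my_dir
--     first_deg = set(my_dir.get(person, set()))
--     second_deg: Set[str] = set()
--     for f in first_deg:
--         second_deg.update(my_dir.get(f, set()))
--     team = (first_deg | second_deg) - {person}
--     return "_".join([person] + sorted(team))
-- ===== SOURCE B (Python) =====
-- def make_team_roster(person: str, my_dir: dict) -> str: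
--     assert person in my_dir
--     frontier = list(my_dir[person])
--     visited = {person} | set(frontier)
--     reached = set()
--     for _ in range(2):
--         next_frontier = []
--         for node in frontier:
--             reached.add(node)
--             for nb in my_dir.get(node, set()):
--                 if nb not in visited:
--                     visited.add(nb)
--                     next_frontier.append(nb)
--         frontier = next_frontier
--     reached.discard(person)
--     return "_".join([person] + sorted(reached))
-- ===== Notes on version B (the rewrite author's own statement) =====
-- stated objective: alternative
-- what changed: Replaces the two named degree sets (first_deg, then a union loop into second_deg, then set algebra) by a generic two-round BFS with a visited set and frontier list, collecting a single reached set and discarding the person at the end.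
import Mathlib
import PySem

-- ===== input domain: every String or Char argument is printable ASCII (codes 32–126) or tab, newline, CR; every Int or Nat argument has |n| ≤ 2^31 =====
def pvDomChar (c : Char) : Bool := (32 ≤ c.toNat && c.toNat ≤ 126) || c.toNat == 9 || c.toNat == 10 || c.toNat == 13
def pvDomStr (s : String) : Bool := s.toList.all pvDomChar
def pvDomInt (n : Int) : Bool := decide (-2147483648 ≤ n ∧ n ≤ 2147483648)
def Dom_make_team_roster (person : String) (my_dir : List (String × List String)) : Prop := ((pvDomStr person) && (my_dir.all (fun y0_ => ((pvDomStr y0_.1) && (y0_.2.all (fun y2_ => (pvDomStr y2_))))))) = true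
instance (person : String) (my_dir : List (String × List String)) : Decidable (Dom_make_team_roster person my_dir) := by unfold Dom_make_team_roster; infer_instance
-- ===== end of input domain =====

-- B replaces A's two named degree sets and set algebra by a two-round BFS with a
-- visited set and frontier list (alternative decomposition; return value only — A asserts, so
-- Pre_ requires person to be a key).

-- ===== PORT A =====
def make_team_roster (person : String) (my_dir : List (String × List String)) : String :=
  let d := PySem.Dict.mk my_dir
  let first_deg : PySem.Set String := PySem.Set.ofList (PySem.Dict.getD d person [])
  let second_deg : PySem.Set String :=
    first_deg.foldl (fun s f => PySem.Set.update s (PySem.Dict.getD d f [])) PySem.Set.empty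
  let team := PySem.Set.diff (PySem.Set.union first_deg second_deg) (PySem.Set.ofList [person])
  PySem.Str.join "_" ([person] ++ PySem.List.sorted team (fun x => x) false)

-- ===== PORT B =====
-- inner neighbour loop of B: for nb in my_dir.get(node, set()): if nb not in visited: …
def pvDiscover (g : String → List String) (node : String)
    (p : List String × PySem.Set String) : List String × PySem.Set String :=
  (PySem.Set.ofList (g node)).foldl
    (fun q nb => if PySem.Set.contains q.2 nb then q else (q.1 ++ [nb], PySem.Set.add q.2 nb)) p

-- one round of B: for node in frontier: reached.add(node); <neighbour loop>
def pvRound (g : String → List String) (frontier : List String)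
    (st : List String × PySem.Set String × PySem.Set String) :
    List String × PySem.Set String × PySem.Set String :=
  frontier.foldl
    (fun st node =>
      let p := pvDiscover g node (st.1, st.2.1)
      (p.1, p.2, PySem.Set.add st.2.2 node))
    st

def make_team_roster_alt (person : String) (my_dir : List (String × List String)) : String :=
  let g := fun f => PySem.Dict.getD (PySem.Dict.mk my_dir) f []
  let frontier0 : List String := PySem.Set.ofList (g person)
  let visited0 : PySem.Set String := PySem.Set.union (PySem.Set.ofList [person]) frontier0
  let final := (PySem.List.pyRange 0 2 1).foldl
    (fun st _ => pvRound g st.1 ([], st.2.1, st.2.2)) (frontier0, visited0, PySem.Set.empty)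
  let reached := PySem.Set.discard final.2.2 person
  PySem.Str.join "_" ([person] ++ PySem.List.sorted reached (fun x => x) false)

-- ===== PRECONDITION & SPEC =====
-- A asserts 'person in my_dir'; Pre_ excludes exactly the inputs where that assert fires.
def Pre_make_team_roster (person : String) (my_dir : List (String × List String)) : Prop :=
  person ∈ my_dir.map Prod.fst
instance (person : String) (my_dir : List (String × List String)) : Decidable (Pre_make_team_roster person my_dir) := by unfold Pre_make_team_roster; infer_instance
def pvWitness_make_team_roster : String × (List (String × List String)) := ("a", [("a", ["b"])])
def Spec_make_team_roster (person : String) (my_dir : List (String × List String)) (out : String) : Prop := out = make_team_roster_alt person my_dir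
instance (person : String) (my_dir : List (String × List String)) (out : String) : Decidable (Spec_make_team_roster person my_dir out) := by unfold Spec_make_team_roster; infer_instance

-- ===== CLAIM (what is proved, stated in full; the proofs are below) =====
def Claim_equal_make_team_roster : Prop := ∀ (person : String) (my_dir : List (String × List String)), Dom_make_team_roster person my_dir → Pre_make_team_roster person my_dir → Spec_make_team_roster person my_dir (make_team_roster person my_dir)

-- ===== LEMMAS AND PROOFS =====

-- A's accumulation loop: membership in the folded update.
theorem mem_foldl_update (g : String → List String) (l : List String)
    (s : PySem.Set String) (x : String) :
    x ∈ l.foldl (fun s f => PySem.Set.update s (g f)) s ↔ x ∈ s ∨ ∃ f ∈ l, x ∈ g f := by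
  induction l generalizing s with
  | nil => simp
  | cons f l ih => simp [ih, PySem.Set.mem_update]; tauto

theorem mem_discover_nf (l : List String)
    (p : List String × PySem.Set String) (x : String) :
    x ∈ (l.foldl (fun q nb => if PySem.Set.contains q.2 nb then q
          else (q.1 ++ [nb], PySem.Set.add q.2 nb)) p).1 ↔
      x ∈ p.1 ∨ (x ∉ p.2 ∧ x ∈ l) := by
  induction l generalizing p with
  | nil => simp
  | cons y l ih =>
    simp only [List.foldl_cons]
    by_cases hy : PySem.Set.contains p.2 y
    · rw [if_pos hy, PySem.Set.contains_iff] at *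
      rw [ih]
      simp only [List.mem_cons]
      by_cases hxy : x = y
      · subst hxy; tauto
      · tauto
    · rw [if_neg hy]
      rw [PySem.Set.contains_iff] at hy
      rw [ih]
      simp only [List.mem_append, List.mem_cons, List.not_mem_nil, or_false,
        PySem.Set.mem_add]
      by_cases hxy : x = y
      · subst hxy; tauto
      · tauto

theorem mem_discover_vis (l : List String)
    (p : List String × PySem.Set String) (x : String) :
    x ∈ (l.foldl (fun q nb => if PySem.Set.contains q.2 nb then q
          else (q.1 ++ [nb], PySem.Set.add q.2 nb)) p).2 ↔
      x ∈ p.2 ∨ x ∈ l := by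
  induction l generalizing p with
  | nil => simp
  | cons y l ih =>
    simp only [List.foldl_cons]
    by_cases hy : PySem.Set.contains p.2 y
    · rw [if_pos hy, PySem.Set.contains_iff] at *
      rw [ih]
      simp only [List.mem_cons]
      by_cases hxy : x = y
      · subst hxy; tauto
      · tauto
    · rw [if_neg hy]
      rw [ih]
      simp only [PySem.Set.mem_add, List.mem_cons]
      tauto

theorem mem_pvDiscover_nf (g : String → List String) (node : String)
    (p : List String × PySem.Set String) (x : String) :
    x ∈ (pvDiscover g node p).1 ↔ x ∈ p.1 ∨ (x ∉ p.2 ∧ x ∈ g node) := by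
  unfold pvDiscover
  rw [mem_discover_nf]
  simp [PySem.Set.mem_ofList]

theorem mem_pvDiscover_vis (g : String → List String) (node : String)
    (p : List String × PySem.Set String) (x : String) :
    x ∈ (pvDiscover g node p).2 ↔ x ∈ p.2 ∨ x ∈ g node := by
  unfold pvDiscover
  rw [mem_discover_vis]
  simp [PySem.Set.mem_ofList]

theorem mem_pvRound_reached (g : String → List String) (fr : List String)
    (st : List String × PySem.Set String × PySem.Set String) (x : String) :
    x ∈ (pvRound g fr st).2.2 ↔ x ∈ st.2.2 ∨ x ∈ fr := by
  induction fr generalizing st with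
  | nil => simp [pvRound]
  | cons f fr ih =>
    simp only [pvRound, List.foldl_cons] at *
    rw [ih]
    simp only [PySem.Set.mem_add, List.mem_cons]
    tauto

theorem mem_pvRound_nf (g : String → List String) (fr : List String)
    (st : List String × PySem.Set String × PySem.Set String) (x : String) :
    x ∈ (pvRound g fr st).1 ↔ x ∈ st.1 ∨ (x ∉ st.2.1 ∧ ∃ f ∈ fr, x ∈ g f) := by
  induction fr generalizing st with
  | nil => simp [pvRound]
  | cons f fr ih =>
    simp only [pvRound, List.foldl_cons] at *
    rw [ih]
    simp only [mem_pvDiscover_nf, mem_pvDiscover_vis, List.mem_cons]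
    constructor
    · rintro ((h | ⟨h1, h2⟩) | ⟨h1, f', hf', h⟩)
      · exact Or.inl h
      · exact Or.inr ⟨h1, f, Or.inl rfl, h2⟩
      · push_neg at h1
        exact Or.inr ⟨h1.1, f', Or.inr hf', h⟩
    · rintro (h | ⟨h1, f', rfl | hf', h⟩)
      · exact Or.inl (Or.inl h)
      · exact Or.inl (Or.inr ⟨h1, h⟩)
      · by_cases hgx : x ∈ g f
        · exact Or.inl (Or.inr ⟨h1, hgx⟩)
        · exact Or.inr ⟨by push_neg; exact ⟨h1, hgx⟩, f', hf', h⟩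

theorem nodup_pvRound_reached (g : String → List String) (fr : List String)
    (st : List String × PySem.Set String × PySem.Set String) (h : st.2.2.Nodup) :
    (pvRound g fr st).2.2.Nodup := by
  induction fr generalizing st with
  | nil => simpa [pvRound] using h
  | cons f fr ih =>
    simp only [pvRound, List.foldl_cons] at *
    exact ih _ (PySem.Set.nodup_add _ _ h)

theorem join_congr (person : String) (s t : List String) (h : s = t) :
    PySem.Str.join "_" ([person] ++ s) = PySem.Str.join "_" ([person] ++ t) := by rw [h]

-- ===== VERDICT (by name: the statement is the Claim_ definition above) =====
theorem make_team_roster_spec : Claim_equal_make_team_roster := by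
  intro person my_dir _ _
  show _ = make_team_roster_alt person my_dir
  unfold make_team_roster make_team_roster_alt
  simp only []
  apply join_congr
  set d := PySem.Dict.mk my_dir with hd
  set g : String → List String := fun f => PySem.Dict.getD d f [] with hg
  have hrange : PySem.List.pyRange 0 2 1 = [0, 1] := by decide
  rw [hrange]
  simp only [List.foldl_cons, List.foldl_nil]
  -- name the two sides' underlying lists
  apply PySem.List.sorted_eq_sorted_of_perm _ _ _ (fun a b h => h)
  -- A side list
  have hAnodup : (PySem.Set.diff
      (PySem.Set.union (PySem.Set.ofList (g person))
        ((PySem.Set.ofList (g person)).foldl (fun s f => PySem.Set.update s (g f)) PySem.Set.empty))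
      (PySem.Set.ofList [person])).Nodup :=
    PySem.Set.nodup_diff _ _ (PySem.Set.nodup_union _ _ (PySem.Set.nodup_ofList _))
  have hBnodup : (PySem.Set.discard
      ((pvRound g (pvRound g (PySem.Set.ofList (g person))
          ([], PySem.Set.union (PySem.Set.ofList [person]) (PySem.Set.ofList (g person)), PySem.Set.empty)).1
        ([], (pvRound g (PySem.Set.ofList (g person))
          ([], PySem.Set.union (PySem.Set.ofList [person]) (PySem.Set.ofList (g person)), PySem.Set.empty)).2.1,
          (pvRound g (PySem.Set.ofList (g person))
          ([], PySem.Set.union (PySem.Set.ofList [person]) (PySem.Set.ofList (g person)), PySem.Set.empty)).2.2)).2.2)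
      person).Nodup := by
    apply PySem.Set.nodup_discard
    apply nodup_pvRound_reached
    apply nodup_pvRound_reached
    exact List.nodup_nil
  rw [List.perm_ext_iff_of_nodup hAnodup hBnodup]
  intro x
  rw [PySem.Set.mem_diff, PySem.Set.mem_union, mem_foldl_update, PySem.Set.mem_discard,
      mem_pvRound_reached, mem_pvRound_reached, mem_pvRound_nf]
  simp only [PySem.Set.mem_ofList, PySem.Set.mem_union, PySem.Set.empty, List.not_mem_nil,
    List.mem_cons, false_or, or_false]
  by_cases hxf : x ∈ g person
  · tauto
  · tauto
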